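-- pv_equiv track=rewrite | github.com/ClarityCoders/AutoTube | MovieMaker/utils.py | _add_return_comment
-- ===== SOURCE A (Python) =====
-- from typing import Tuple
--
-- def _add_return_comment(comment: str) -> Tuple[str, int]:
--     need_return = 30
--     new_comment = ""
--     return_added = 0
--     if comment:
--         return_added += comment.count('\n')
--         for i, letter in enumerate(comment):
--             if i > need_return and letter == " ":
--                 letter = "\n"
--                 need_return += 30
--                 return_added += 1
--             new_comment += letter
--     return new_comment, return_added
-- ===== SOURCE B (Python) =====
-- from typing import Tuple
--
-- def _add_return_comment(comment: str) -> Tuple[str, int]: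
--     # Jump from space to space with str.find instead of walking every character.
--     breaks = []
--     need_return = 30
--     pos = comment.find(' ', need_return + 1)
--     while pos != -1:
--         breaks.append(pos)
--         need_return += 30
--         pos = comment.find(' ', max(need_return + 1, pos + 1))
--     chars = list(comment)
--     for p in breaks:
--         chars[p] = '\n'
--     return ''.join(chars), comment.count('\n') + len(breaks)
-- ===== Notes on version B (the rewrite author's own statement) =====
-- stated objective: faster
-- what changed: Instead of walking every character with a moving threshold, B repeatedly calls str.find to jump directly to the next breakable space, collects the break positions, patches them into a char list, and computes the count as the preexisting newline count plus the number of breaks.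
import Mathlib
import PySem

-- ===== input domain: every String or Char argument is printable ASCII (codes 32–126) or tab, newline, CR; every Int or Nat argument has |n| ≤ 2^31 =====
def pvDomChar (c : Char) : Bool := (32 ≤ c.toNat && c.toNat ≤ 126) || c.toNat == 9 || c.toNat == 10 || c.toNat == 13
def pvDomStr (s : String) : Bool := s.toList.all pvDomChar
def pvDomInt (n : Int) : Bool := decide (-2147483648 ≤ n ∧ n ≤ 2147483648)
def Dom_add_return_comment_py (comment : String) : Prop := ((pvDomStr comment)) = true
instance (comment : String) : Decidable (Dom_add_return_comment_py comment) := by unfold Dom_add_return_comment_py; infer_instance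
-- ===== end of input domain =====

-- B replaces A's per-character loop by repeated str.find jumps from breakable space to breakable space (measured faster; same result).

-- ===== PORT A =====
-- A: one pass over enumerate(comment), turning a space into '\n' whenever its index
-- exceeds the moving threshold; state = (need_return, new_comment chars, return_added).
def add_return_comment_py (comment : String) : String × Int :=
  if comment.toList = [] then ("", 0)
  else
    let ra0 : Int := 0 + (PySem.Chars.count comment.toList ['\n'] : Int)
    let st := (PySem.List.enumerate comment.toList).foldl
      (fun (s : Int × List Char × Int) (p : Int × Char) =>
        if p.1 > s.1 ∧ p.2 = ' ' then (s.1 + 30, s.2.1 ++ ['\n'], s.2.2 + 1)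
        else (s.1, s.2.1 ++ [p.2], s.2.2))
      ((30 : Int), ([] : List Char), ra0)
    (String.ofList st.2.1, st.2.2)

-- ===== PORT B =====
-- helper spec used only to reason about / bound str.find(' ', start): first space index ≥ start
def pvFidx (cs : List Char) (k : Nat) : Option Nat :=
  ((cs.drop k).findIdx? (· = ' ')).map (k + ·)

theorem pvFindGoSpace (s : List Char) (k : Nat) :
    PySem.Chars.find.go [' '] s k =
      match s.findIdx? (· = ' ') with
      | none => -1
      | some j => ((k + j : Nat) : Int) := by
  induction s generalizing k with
  | nil => simp [PySem.Chars.find.go]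
  | cons c t ih =>
    rw [PySem.Chars.find.go, List.findIdx?_cons]
    by_cases hc : c = ' '
    · simp [hc, List.isPrefixOf]
    · have : ([' '].isPrefixOf (c :: t)) = false := by
        simp [List.isPrefixOf]
        exact fun h => hc h.symm
      rw [this]
      simp only [Bool.false_eq_true, if_false, ih (k + 1)]
      have hcb : ((· = ' ') c : Bool) = false := by simp [hc]
      rw [hcb]
      simp only [Bool.false_eq_true, if_false]
      cases h : List.findIdx? (· = ' ') t with
      | none => simp
      | some j => simp; ring

theorem pvFidx_none_of_ge (cs : List Char) (k : Nat) (h : cs.length ≤ k) : pvFidx cs k = none := by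
  unfold pvFidx
  rw [List.drop_eq_nil_of_le h]
  simp

theorem pvFindFromSpace (cs : List Char) (k : Nat) :
    PySem.Chars.findFrom cs [' '] (k : Int) none =
      match pvFidx cs k with
      | none => -1
      | some p => (p : Int) := by
  unfold PySem.Chars.findFrom PySem.Chars.find
  have hk0 : ¬ ((k : Int) < 0) := by omega
  simp only [if_neg hk0]
  by_cases hk : cs.length < k
  · have h1 : ((cs.length : Int) < (k : Int)) := by exact_mod_cast hk
    rw [if_pos h1, pvFidx_none_of_ge cs k (by omega)]
  · have h1 : ¬ ((cs.length : Int) < (k : Int)) := by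
      intro h; exact hk (by exact_mod_cast h)
    rw [if_neg h1]
    simp only [Int.toNat_natCast, List.take_length]
    rw [pvFindGoSpace]
    unfold pvFidx
    cases h : List.findIdx? (· = ' ') (cs.drop k) with
    | none => simp
    | some j =>
      simp only [Option.map_some, Nat.zero_add]
      have hne : ¬ ((j : Int) = -1) := by omega
      rw [if_neg hne]
      push_cast
      ring

theorem pvFidx_bound (cs : List Char) (k p : Nat) (h : pvFidx cs k = some p) :
    k ≤ p ∧ p < cs.length := by
  unfold pvFidx at h
  cases hf : List.findIdx? (· = ' ') (cs.drop k) with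
  | none => rw [hf] at h; simp at h
  | some j =>
    rw [hf] at h
    have hj : j < (cs.drop k).length := (List.findIdx?_eq_some_iff_getElem.mp hf).1
    simp at h
    subst h
    constructor
    · omega
    · simp at hj; omega

-- B: repeatedly str.find(' ', start) for the next breakable space, collecting break positions.
def pvBLoop (cs : List Char) (nr : Nat) (start : Nat) : List Nat :=
  let r := PySem.Chars.findFrom cs [' '] (start : Int) none
  if h : r = -1 then []
  else
    r.toNat :: pvBLoop cs (nr + 30) (max (nr + 30 + 1) (r.toNat + 1))
termination_by cs.length - start
decreasing_by
  cases hp : pvFidx cs start with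
  | none =>
    have hr : r = -1 := by
      have hs := pvFindFromSpace cs start
      rw [hp] at hs
      exact hs
    exact absurd hr h
  | some p =>
    obtain ⟨h1, h2⟩ := pvFidx_bound cs start p hp
    have hr : r = (p : Int) := by
      have hs := pvFindFromSpace cs start
      rw [hp] at hs
      exact hs
    have hr2 : r.toNat = p := by rw [hr]; simp
    omega

def add_return_comment_py_alt (comment : String) : String × Int :=
  let cs := comment.toList
  let breaks := pvBLoop cs 30 31
  let chars := breaks.foldl (fun l p => l.set p '\n') cs
  (String.ofList chars, (PySem.Chars.count cs ['\n'] : Int) + breaks.length)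

-- ===== PRECONDITION & SPEC =====
def Spec_add_return_comment_py (comment : String) (out : String × Int) : Prop := out = add_return_comment_py_alt comment
instance (comment : String) (out : String × Int) : Decidable (Spec_add_return_comment_py comment out) := by unfold Spec_add_return_comment_py; infer_instance

-- ===== CLAIM (what is proved, stated in full; the proofs are below) =====
def Claim_equal_add_return_comment_py : Prop := ∀ (comment : String), Dom_add_return_comment_py comment → Spec_add_return_comment_py comment (add_return_comment_py comment)

-- ===== LEMMAS AND PROOFS =====

-- reference: the break positions / replaced characters A's loop produces, as structural recursions
def pvBref : List Char → Nat → Nat → List Nat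
  | [], _, _ => []
  | c :: rest, i, nr => if nr < i ∧ c = ' ' then i :: pvBref rest (i + 1) (nr + 30) else pvBref rest (i + 1) nr

def pvRepl : List Char → Nat → Nat → List Char
  | [], _, _ => []
  | c :: rest, i, nr => if nr < i ∧ c = ' ' then '\n' :: pvRepl rest (i + 1) (nr + 30) else c :: pvRepl rest (i + 1) nr

theorem pvFidx_hit (cs : List Char) (k : Nat) (hk : k < cs.length) (h : cs[k] = ' ') :
    pvFidx cs k = some k := by
  unfold pvFidx
  rw [List.drop_eq_getElem_cons hk, List.findIdx?_cons]
  simp [h]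

theorem pvFidx_skip (cs : List Char) (k : Nat) (hk : k < cs.length) (h : cs[k] ≠ ' ') :
    pvFidx cs k = pvFidx cs (k + 1) := by
  unfold pvFidx
  rw [List.drop_eq_getElem_cons hk, List.findIdx?_cons]
  have : ((· = ' ') cs[k] : Bool) = false := by simp [h]
  rw [this]
  simp only [Bool.false_eq_true, if_false]
  cases hf : List.findIdx? (· = ' ') (cs.drop (k + 1)) with
  | none => simp
  | some j => simp; omega

-- A's loop over enumerate equals (pvRepl, count of pvBref)
theorem pvFoldA (rest : List Char) (i nr : Nat) (s a : Int) (acc : List Char) (ra : Int)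
    (hs : s = (i : Int)) (ha : a = (nr : Int)) :
    (PySem.List.enumerate rest s).foldl
      (fun (s : Int × List Char × Int) (p : Int × Char) =>
        if p.1 > s.1 ∧ p.2 = ' ' then (s.1 + 30, s.2.1 ++ ['\n'], s.2.2 + 1)
        else (s.1, s.2.1 ++ [p.2], s.2.2))
      (a, acc, ra)
    = (((nr + 30 * (pvBref rest i nr).length : Nat) : Int), acc ++ pvRepl rest i nr,
        ra + (pvBref rest i nr).length) := by
  subst hs ha
  induction rest generalizing i nr acc ra with
  | nil => simp [pvBref, pvRepl, PySem.List.enumerate]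
  | cons c t ih =>
    rw [PySem.List.enumerate_cons, List.foldl_cons]
    by_cases hc : nr < i ∧ c = ' '
    · have hcond : ((i : Int) > (nr : Int) ∧ c = ' ') := ⟨by exact_mod_cast hc.1, hc.2⟩
      rw [if_pos hcond]
      have h30 : ((nr : Int)) + 30 = (((nr + 30 : Nat)) : Int) := by push_cast; ring
      have h1 : ((i : Int)) + 1 = (((i + 1 : Nat)) : Int) := by push_cast; ring
      rw [h30, h1, ih (i + 1) (nr + 30) (acc ++ ['\n']) (ra + 1)]
      simp only [pvBref, pvRepl, if_pos hc, List.length_cons]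
      refine Prod.ext ?_ (Prod.ext ?_ ?_)
      · simp
        ring
      · simp
      · simp
        ring
    · have hcond : ¬ ((i : Int) > (nr : Int) ∧ c = ' ') := by
        intro ⟨ha, hb⟩; exact hc ⟨by exact_mod_cast ha, hb⟩
      rw [if_neg hcond]
      have h1 : ((i : Int)) + 1 = (((i + 1 : Nat)) : Int) := by push_cast; ring
      rw [h1, ih (i + 1) nr (acc ++ [c]) ra]
      simp only [pvBref, pvRepl, if_neg hc]
      refine Prod.ext ?_ (Prod.ext ?_ ?_) <;> simp

-- step lemma: pvBref's first break is the first space past max i (nr+1)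
theorem pvBrefStep (cs : List Char) (n i nr : Nat) (hn : cs.length - i ≤ n) :
    pvBref (cs.drop i) i nr =
      match pvFidx cs (max i (nr + 1)) with
      | none => []
      | some p => p :: pvBref (cs.drop (p + 1)) (p + 1) (nr + 30) := by
  induction n generalizing i nr with
  | zero =>
    have hge : cs.length ≤ i := by omega
    rw [List.drop_eq_nil_of_le hge]
    rw [pvFidx_none_of_ge cs _ (le_trans hge (Nat.le_max_left _ _))]
    simp [pvBref]
  | succ n ih =>
    by_cases hi : i < cs.length
    · rw [List.drop_eq_getElem_cons hi]
      by_cases hc : nr < i ∧ cs[i] = ' '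
      · have hmax : max i (nr + 1) = i := by omega
        rw [hmax, pvFidx_hit cs i hi hc.2]
        simp [pvBref, if_pos hc]
      · have heq : pvFidx cs (max i (nr + 1)) = pvFidx cs (max (i + 1) (nr + 1)) := by
          by_cases hle : i ≤ nr
          · have e1 : max i (nr + 1) = nr + 1 := by omega
            have e2 : max (i + 1) (nr + 1) = nr + 1 := by omega
            rw [e1, e2]
          · have hnr : nr < i := by omega
            have hcs : cs[i] ≠ ' ' := fun h => hc ⟨hnr, h⟩
            have e1 : max i (nr + 1) = i := by omega
            have e2 : max (i + 1) (nr + 1) = i + 1 := by omega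
            rw [e1, e2, pvFidx_skip cs i hi hcs]
        rw [heq]
        have := ih (i + 1) nr (by omega)
        rw [← this]
        simp [pvBref, if_neg hc]
    · have hge : cs.length ≤ i := by omega
      rw [List.drop_eq_nil_of_le hge]
      rw [pvFidx_none_of_ge cs _ (le_trans hge (Nat.le_max_left _ _))]
      simp [pvBref]

-- B's find loop computes pvBref
theorem pvBLoopEq (cs : List Char) (n i nr : Nat) (hn : cs.length - i ≤ n) :
    pvBLoop cs nr (max i (nr + 1)) = pvBref (cs.drop i) i nr := by
  induction n generalizing i nr with
  | zero =>
    have hge : cs.length ≤ i := by omega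
    have hnone : pvFidx cs (max i (nr + 1)) = none :=
      pvFidx_none_of_ge cs _ (le_trans hge (Nat.le_max_left _ _))
    rw [pvBLoop, pvFindFromSpace, hnone, pvBrefStep cs 0 i nr (by omega), hnone]
    rfl
  | succ n ih =>
    rw [pvBLoop, pvFindFromSpace, pvBrefStep cs (n + 1) i nr hn]
    cases hp : pvFidx cs (max i (nr + 1)) with
    | none => simp
    | some p =>
      obtain ⟨h1, h2⟩ := pvFidx_bound cs _ p hp
      have hmax : i ≤ max i (nr + 1) := Nat.le_max_left _ _
      have hne : ¬ ((p : Int) = -1) := by omega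
      rw [dif_neg hne]
      simp only [Int.toNat_natCast]
      have hm2 : max (nr + 30 + 1) (p + 1) = max (p + 1) ((nr + 30) + 1) := by omega
      rw [hm2, ih (p + 1) (nr + 30) (by omega)]

-- replaying the breaks with list.set yields pvRepl
theorem pvSetFold (rest : List Char) (i nr : Nat) (pre : List Char) (hpre : pre.length = i) :
    (pvBref rest i nr).foldl (fun l p => l.set p '\n') (pre ++ rest) = pre ++ pvRepl rest i nr := by
  induction rest generalizing i nr pre with
  | nil => simp [pvBref, pvRepl]
  | cons c t ih =>
    by_cases hc : nr < i ∧ c = ' '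
    · simp only [pvBref, pvRepl, if_pos hc, List.foldl_cons]
      have hset : (pre ++ c :: t).set i '\n' = (pre ++ ['\n']) ++ t := by
        rw [List.set_append]
        simp [hpre]
      rw [hset]
      have := ih (i + 1) (nr + 30) (pre ++ ['\n']) (by simp [hpre])
      rw [this]
      simp
    · simp only [pvBref, pvRepl, if_neg hc]
      have hassoc : pre ++ c :: t = (pre ++ [c]) ++ t := by simp
      rw [hassoc]
      have := ih (i + 1) nr (pre ++ [c]) (by simp [hpre])
      rw [this]
      simp

theorem pvAltEq (comment : String) :
    add_return_comment_py_alt comment =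
      (String.ofList (pvRepl comment.toList 0 30),
        (PySem.Chars.count comment.toList ['\n'] : Int) + (pvBref comment.toList 0 30).length) := by
  unfold add_return_comment_py_alt
  have hb : pvBLoop comment.toList 30 31 = pvBref comment.toList 0 30 := by
    have h := pvBLoopEq comment.toList comment.toList.length 0 30 (by omega)
    have hm : (max 0 (30 + 1) : Nat) = 31 := by norm_num
    rw [hm, List.drop_zero] at h
    exact h
  have hset := pvSetFold comment.toList 0 30 [] rfl
  simp only [List.nil_append] at hset
  simp only [hb, hset]

theorem pvAEq (comment : String) :
    add_return_comment_py comment =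
      (String.ofList (pvRepl comment.toList 0 30),
        (PySem.Chars.count comment.toList ['\n'] : Int) + (pvBref comment.toList 0 30).length) := by
  unfold add_return_comment_py
  by_cases he : comment.toList = []
  · rw [if_pos he, he]
    simp [pvRepl, pvBref, PySem.Chars.count]
  · rw [if_neg he]
    dsimp only
    rw [pvFoldA comment.toList 0 30 _ _ []
      (0 + (PySem.Chars.count comment.toList ['\n'] : Int)) (by norm_num) (by norm_num)]
    refine Prod.ext ?_ ?_
    · simp
    · simp

-- ===== VERDICT (by name: the statement is the Claim_ definition above) =====
theorem add_return_comment_py_spec : Claim_equal_add_return_comment_py := by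
  intro comment _
  unfold Spec_add_return_comment_py
  rw [pvAEq, pvAltEq]
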